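-- pv_equiv track=rewrite | github.com/Colecf/LutronHomeworksControl | lutronhomeworks.py | normalizeSingleAddress
-- ===== SOURCE A (Python) =====
-- def stripLeadingZeros(num):
--     if(len(num) == 0):
--         return num
--     return str(int(num))
--
-- def normalizeSingleAddress(addr):
--     result = ''
--     latestNumber = ''
--     for c in addr:
--         if ord(c) >= ord('0') and ord(c) <= ord('9'):
--             latestNumber += c
--         elif c == '.' or c == ':' or c == '/' or c == '\\' or c == '-':
--             result += stripLeadingZeros(latestNumber)+':'
--             latestNumber = ''
--     return result+stripLeadingZeros(latestNumber)
-- ===== SOURCE B (Python) =====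
-- def normalizeSingleAddress(addr):
--     # Split-first decomposition: canonicalize every delimiter to ':', split once,
--     # then normalize each segment (keep ASCII digits, strip leading zeros) and rejoin.
--     canon = ''.join(':' if c in '.:/\\-' else c for c in addr)
--     parts = []
--     for seg in canon.split(':'):
--         digits = ''.join(c for c in seg if '0' <= c <= '9')
--         parts.append(str(int(digits)) if digits else '')
--     return ':'.join(parts)
-- ===== Notes on version B (the rewrite author's own statement) =====
-- stated objective: alternative
-- what changed: A's single char-by-char accumulate/flush loop (building the result string as it goes) is replaced by a split-first decomposition: canonicalize every delimiter to a common separator, split the string once, normalize each segment independently (keep ASCII digits, strip leading zeros via int), and join the parts.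
import Mathlib
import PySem

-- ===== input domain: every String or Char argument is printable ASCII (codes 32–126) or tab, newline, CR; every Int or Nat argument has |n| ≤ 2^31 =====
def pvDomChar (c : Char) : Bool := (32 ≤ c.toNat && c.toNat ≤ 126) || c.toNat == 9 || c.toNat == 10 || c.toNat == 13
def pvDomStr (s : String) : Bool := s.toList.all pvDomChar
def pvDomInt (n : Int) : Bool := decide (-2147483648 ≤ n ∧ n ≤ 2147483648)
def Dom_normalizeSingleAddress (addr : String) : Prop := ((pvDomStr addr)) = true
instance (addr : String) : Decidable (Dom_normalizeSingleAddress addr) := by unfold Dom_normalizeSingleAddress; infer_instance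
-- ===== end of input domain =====

-- B replaces A's single accumulate/flush character loop by a split-first decomposition
-- (canonicalize delimiters to ':', split once, normalize each segment, join); objective: alternative.

-- ===== PORT A =====
-- stripLeadingZeros(num): at every call site num is a (possibly empty) string of ASCII digits,
-- so int(num) never raises; ofChars? returns some there and the .getD 0 default is unreachable.
def stripLeadingZeros (num : List Char) : List Char :=
  if num.length = 0 then num
  else PySem.Int.toChars ((PySem.Int.ofChars? num).getD 0)

/-- the body of A's for-loop; state = (result, latestNumber) -/
def stepA (st : List Char × List Char) (c : Char) : List Char × List Char :=
  if '0' ≤ c ∧ c ≤ '9' then (st.1, st.2 ++ [c])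
  else if c = '.' ∨ c = ':' ∨ c = '/' ∨ c = '\\' ∨ c = '-' then
    (st.1 ++ stripLeadingZeros st.2 ++ [':'], [])
  else st

def normalizeSingleAddress (addr : String) : String :=
  let fin := addr.toList.foldl stepA ([], [])
  String.ofList (fin.1 ++ stripLeadingZeros fin.2)

-- ===== PORT B =====
-- per-segment normalization: digits = ''.join(c for c in seg if '0' <= c <= '9');
-- then str(int(digits)) if digits else '' (digits is nonempty all-digits in the int()
-- branch, so ofChars? = some; the .getD 0 default is unreachable).
def altSeg (seg : List Char) : List Char :=
  let digits := seg.filter (fun c => decide ('0' ≤ c ∧ c ≤ '9'))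
  if digits = [] then [] else PySem.Int.toChars ((PySem.Int.ofChars? digits).getD 0)

def normalizeSingleAddress_alt (addr : String) : String :=
  -- canon = ''.join(':' if c in '.:/\\-' else c for c in addr)
  let canon := addr.toList.map (fun c => if c ∈ ['.', ':', '/', '\\', '-'] then ':' else c)
  -- parts = [altSeg(seg) for seg in canon.split(':')]; return ':'.join(parts)
  let parts := (PySem.Chars.splitOn canon [':']).map altSeg
  String.ofList (PySem.Chars.join [':'] parts)

-- ===== PRECONDITION & SPEC =====
def Spec_normalizeSingleAddress (addr : String) (out : String) : Prop := out = normalizeSingleAddress_alt addr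
instance (addr : String) (out : String) : Decidable (Spec_normalizeSingleAddress addr out) := by unfold Spec_normalizeSingleAddress; infer_instance

-- ===== CLAIM (what is proved, stated in full; the proofs are below) =====
def Claim_equal_normalizeSingleAddress : Prop := ∀ (addr : String), Dom_normalizeSingleAddress addr → Spec_normalizeSingleAddress addr (normalizeSingleAddress addr)

-- ===== LEMMAS AND PROOFS =====

/-- apply f to the head segment only -/
def mapHead (f : List Char → List Char) : List (List Char) → List (List Char)
  | [] => []
  | x :: xs => f x :: xs

/-- structural single-character split (what s.split(d) computes) -/
def mySplit (d : Char) : List Char → List (List Char)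
  | [] => [[]]
  | c :: cs => if c = d then [] :: mySplit d cs else mapHead (c :: ·) (mySplit d cs)

lemma mySplit_ne_nil (d : Char) (cs : List Char) : mySplit d cs ≠ [] := by
  cases cs with
  | nil => simp [mySplit]
  | cons c cs =>
    simp only [mySplit]
    split
    · simp
    · cases h : mySplit d cs with
      | nil => exact absurd h (mySplit_ne_nil d cs)
      | cons x xs => simp [mapHead]

lemma go_nil (d : Char) (f : Nat) (cur : List Char) (acc : List (List Char)) :
    PySem.Chars.splitOn.go [d] (f + 1) [] cur acc = (cur.reverse :: acc).reverse := by
  rw [PySem.Chars.splitOn.go.eq_def]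

lemma go_cons (d c : Char) (f : Nat) (rest cur : List Char) (acc : List (List Char)) :
    PySem.Chars.splitOn.go [d] (f + 1) (c :: rest) cur acc =
      if [d].isPrefixOf (c :: rest) then
        PySem.Chars.splitOn.go [d] f rest [] (cur.reverse :: acc)
      else PySem.Chars.splitOn.go [d] f rest (c :: cur) acc := by
  rw [PySem.Chars.splitOn.go.eq_def]; simp

lemma go_spec (d : Char) : ∀ (fuel : Nat) (l cur : List Char) (acc : List (List Char)),
    l.length < fuel →
    PySem.Chars.splitOn.go [d] fuel l cur acc
      = acc.reverse ++ mapHead (fun t => cur.reverse ++ t) (mySplit d l) := by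
  intro fuel
  induction fuel with
  | zero => intro l cur acc h; omega
  | succ f ih =>
    intro l cur acc h
    cases l with
    | nil => rw [go_nil]; simp [mySplit, mapHead]
    | cons c rest =>
      rw [go_cons]
      have hlen : rest.length < f := by simp only [List.length_cons] at h; omega
      by_cases hc : c = d
      · have hb : [d].isPrefixOf (c :: rest) = true := by simp [List.isPrefixOf, hc]
        rw [if_pos hb, ih rest [] (cur.reverse :: acc) hlen]
        rw [show mySplit d (c :: rest) = [] :: mySplit d rest by
          simp only [mySplit, if_pos hc]]
        cases hms : mySplit d rest with
        | nil => exact absurd hms (mySplit_ne_nil d rest)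
        | cons x xs => simp [mapHead]
      · have hb : [d].isPrefixOf (c :: rest) = false := by
          simp only [List.isPrefixOf, Bool.and_true,
            beq_eq_false_iff_ne, ne_eq]
          exact fun h => hc h.symm
        rw [if_neg (by simp [hb]), ih rest (c :: cur) acc hlen]
        rw [show mySplit d (c :: rest) = mapHead (c :: ·) (mySplit d rest) by
          simp only [mySplit, if_neg hc]]
        cases hms : mySplit d rest with
        | nil => exact absurd hms (mySplit_ne_nil d rest)
        | cons x xs => simp [mapHead]

lemma splitOn_eq_mySplit (d : Char) (s : List Char) :
    PySem.Chars.splitOn s [d] = mySplit d s := by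
  rw [PySem.Chars.splitOn, go_spec d (s.length + 1) s [] [] (by omega)]
  cases hms : mySplit d s with
  | nil => exact absurd hms (mySplit_ne_nil d s)
  | cons x xs => simp [mapHead]

def isDigitC (c : Char) : Bool := decide ('0' ≤ c ∧ c ≤ '9')
def isDelimC (c : Char) : Bool := decide (c = '.' ∨ c = ':' ∨ c = '/' ∨ c = '\\' ∨ c = '-')

lemma digit_not_delim {c : Char} (h : '0' ≤ c ∧ c ≤ '9') : isDelimC c = false := by
  obtain ⟨h1, h2⟩ := h
  simp only [isDelimC, decide_eq_false_iff_not]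
  rintro (rfl | rfl | rfl | rfl | rfl) <;> revert h1 h2 <;> decide

/-- split the ORIGINAL characters at delimiters, keeping only digits in each segment -/
def dsplit : List Char → List (List Char)
  | [] => [[]]
  | c :: cs =>
      if isDelimC c then [] :: dsplit cs
      else if isDigitC c then mapHead (c :: ·) (dsplit cs)
      else dsplit cs

lemma dsplit_ne_nil (cs : List Char) : dsplit cs ≠ [] := by
  induction cs with
  | nil => simp [dsplit]
  | cons c cs ih =>
    simp only [dsplit]
    split
    · simp
    · split
      · cases h : dsplit cs with
        | nil => exact absurd h ih
        | cons x xs => simp [mapHead]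
      · exact ih

lemma dsplit_eq (cs : List Char) :
    dsplit cs
      = (mySplit ':' (cs.map (fun c => if c ∈ ['.', ':', '/', '\\', '-'] then ':' else c))).map
          (fun seg => seg.filter isDigitC) := by
  induction cs with
  | nil => simp [dsplit, mySplit]
  | cons c cs ih =>
    rw [List.map_cons]
    by_cases hd : isDelimC c = true
    · have hm : c ∈ ['.', ':', '/', '\\', '-'] := by
        simp only [isDelimC, decide_eq_true_eq] at hd
        simpa using hd
      rw [if_pos hm]
      simp [dsplit, hd, mySplit, ih]
    · have hm : c ∉ ['.', ':', '/', '\\', '-'] := by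
        simp only [isDelimC, decide_eq_true_eq] at hd
        simpa using hd
      have hcne : ¬ c = ':' := fun h => hm (by simp [h])
      rw [if_neg hm]
      simp only [dsplit, hd, Bool.false_eq_true, if_neg, not_false_iff, mySplit, if_neg hcne]
      cases hms : mySplit ':' (cs.map (fun c => if c ∈ ['.', ':', '/', '\\', '-'] then ':' else c)) with
      | nil => exact absurd hms (mySplit_ne_nil _ _)
      | cons x xs =>
        rw [hms] at ih
        by_cases hdig : isDigitC c = true
        · simp [hdig, mapHead, ih]
        · simp only [Bool.not_eq_true] at hdig
          simp [hdig, mapHead, ih]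

lemma intercalate_cons₂ (sep x y : List Char) (zs : List (List Char)) :
    sep.intercalate (x :: y :: zs) = x ++ sep ++ sep.intercalate (y :: zs) := by
  simp [List.intercalate, List.intersperse]

lemma mapHead_nil_append (l : List (List Char)) : mapHead (fun t => [] ++ t) l = l := by
  cases l <;> simp [mapHead]

lemma foldA_spec : ∀ (cs res cur : List Char),
    (cs.foldl stepA (res, cur)).1 ++ stripLeadingZeros (cs.foldl stepA (res, cur)).2
      = res ++ [':'].intercalate ((mapHead (fun t => cur ++ t) (dsplit cs)).map stripLeadingZeros) := by
  intro cs
  induction cs with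
  | nil => intro res cur; simp [dsplit, mapHead, List.intercalate]
  | cons c cs ih =>
    intro res cur
    by_cases hdig : '0' ≤ c ∧ c ≤ '9'
    · have hD : isDigitC c = true := by simp [isDigitC, hdig]
      have hd : isDelimC c = false := digit_not_delim hdig
      have hstep : stepA (res, cur) c = (res, cur ++ [c]) := by simp [stepA, hdig]
      rw [List.foldl_cons, hstep, ih]
      simp only [dsplit, hd, Bool.false_eq_true, if_neg, not_false_iff, hD, if_pos]
      cases hms : dsplit cs with
      | nil => exact absurd hms (dsplit_ne_nil cs)
      | cons x xs => simp [mapHead]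
    · by_cases hdel : c = '.' ∨ c = ':' ∨ c = '/' ∨ c = '\\' ∨ c = '-'
      · have hD : isDelimC c = true := by simp [isDelimC, hdel]
        have hstep : stepA (res, cur) c = (res ++ stripLeadingZeros cur ++ [':'], []) := by
          simp [stepA, hdig, hdel]
        rw [List.foldl_cons, hstep, ih, mapHead_nil_append]
        simp only [dsplit, hD, if_pos]
        cases hms : dsplit cs with
        | nil => exact absurd hms (dsplit_ne_nil cs)
        | cons x xs =>
          simp [mapHead, intercalate_cons₂, List.append_assoc]
      · have hD : isDigitC c = false := by simp [isDigitC, hdig]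
        have hd : isDelimC c = false := by simp [isDelimC, hdel]
        have hstep : stepA (res, cur) c = (res, cur) := by simp [stepA, hdig, hdel]
        rw [List.foldl_cons, hstep, ih]
        simp [dsplit, hd, hD]

lemma altSeg_eq (seg : List Char) : altSeg seg = stripLeadingZeros (seg.filter isDigitC) := by
  simp only [altSeg, stripLeadingZeros, List.length_eq_zero_iff]
  have : (fun c => decide ('0' ≤ c ∧ c ≤ '9')) = isDigitC := rfl
  rw [this]
  split_ifs with h
  · exact h.symm
  · rfl

-- ===== VERDICT (by name: the statement is the Claim_ definition above) =====
theorem normalizeSingleAddress_spec : Claim_equal_normalizeSingleAddress := by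
  intro addr _
  show normalizeSingleAddress addr = normalizeSingleAddress_alt addr
  simp only [normalizeSingleAddress, normalizeSingleAddress_alt]
  rw [foldA_spec addr.toList [] [], mapHead_nil_append]
  simp only [PySem.Chars.join, splitOn_eq_mySplit, List.nil_append]
  congr 1
  rw [dsplit_eq, List.map_map]
  congr 1
  simp only [Function.comp_def]
  exact List.map_congr_left (fun seg _ => (altSeg_eq seg).symm)
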